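-- pv_equiv track=rewrite | github.com/jjwoori123-lang/programmers | 프로그래머스 완전범죄 ver2(get 을 이용한 방식) .py | solution
-- ===== SOURCE A (Python) =====
-- def solution(info, n, m):
--     answer = 0
--     dp  = {0:0}
--     for x,y in info:
--         rob = {}
--         for k,v in dp.items():
--             if k + x < n: rob[k+x] = min(rob.get(k+x, v), v)
--             if v + y < m: rob[k] = min(rob.get(k, v+y), v+y)
--         dp = rob
--     return min(dp) if len(dp) else -1
-- ===== SOURCE B (Python) =====
-- def solution(info, n, m):
--     # Pareto frontier of reachable (A-penalty, B-penalty) states: a list kept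
--     # sorted by A-penalty; per item, merge the two shifted copies (sorted
--     # merge) and sweep out dominated states; answer is the first state's
--     # A-penalty (the minimum), or -1 if no state survives.
--     front = [(0, 0)]
--     for x, y in info:
--         ra = [(a + x, b) for a, b in front if a + x < n]
--         rb = [(a, b + y) for a, b in front if b + y < m]
--         merged = []
--         i = j = 0
--         while i < len(ra) and j < len(rb):
--             if ra[i] <= rb[j]:
--                 merged.append(ra[i]); i += 1
--             else:
--                 merged.append(rb[j]); j += 1
--         merged.extend(ra[i:])
--         merged.extend(rb[j:])
--         front = []
--         last_b = None
--         for a, b in merged: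
--             if last_b is None or b < last_b:
--                 front.append((a, b))
--                 last_b = b
--     return front[0][0] if front else -1
-- ===== Notes on version B (the rewrite author's own statement) =====
-- stated objective: faster
-- what changed: Replaced the dict DP (min B-penalty stored per A-penalty key, answer = min key) by a Pareto-frontier algorithm: a list of non-dominated (A,B) states kept sorted by A-penalty, updated per item by a two-pointer sorted merge of the two shifted copies followed by a dominance-pruning sweep; the answer is the first frontier state's A-penalty.
import Mathlib
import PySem

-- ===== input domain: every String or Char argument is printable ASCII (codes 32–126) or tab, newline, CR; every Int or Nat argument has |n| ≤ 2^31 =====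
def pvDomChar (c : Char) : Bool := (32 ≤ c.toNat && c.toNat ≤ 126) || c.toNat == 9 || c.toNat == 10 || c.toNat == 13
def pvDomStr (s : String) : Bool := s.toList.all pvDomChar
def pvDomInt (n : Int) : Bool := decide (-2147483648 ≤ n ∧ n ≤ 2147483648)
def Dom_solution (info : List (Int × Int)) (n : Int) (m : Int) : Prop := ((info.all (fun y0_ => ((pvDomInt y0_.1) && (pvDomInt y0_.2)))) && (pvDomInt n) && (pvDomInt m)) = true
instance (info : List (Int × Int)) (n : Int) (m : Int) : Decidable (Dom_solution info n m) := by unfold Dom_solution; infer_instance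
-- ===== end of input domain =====

-- B replaces the dict DP (min B-penalty per A-penalty key, answer = min key) by a Pareto-frontier
-- algorithm (sorted list of non-dominated states, per-item sorted merge + dominance sweep); measured faster in a timing run.

-- ===== PORT A =====
-- inner loop body: rob[k+x] = min(rob.get(k+x, v), v) if k+x<n;  rob[k] = min(rob.get(k, v+y), v+y) if v+y<m
def robStep (n m x y : Int) (rob : PySem.Dict Int Int) (kv : Int × Int) : PySem.Dict Int Int :=
  let rob1 := if kv.1 + x < n then rob.insert (kv.1 + x) (min (rob.getD (kv.1 + x) kv.2) kv.2) else rob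
  if kv.2 + y < m then rob1.insert kv.1 (min (rob1.getD kv.1 (kv.2 + y)) (kv.2 + y)) else rob1

-- one pass of 'for x,y in info': rebuild rob from dp.items
def dpStep (n m : Int) (dp : PySem.Dict Int Int) (xy : Int × Int) : PySem.Dict Int Int :=
  dp.items.foldl (robStep n m xy.1 xy.2) PySem.Dict.empty

def solution (info : List (Int × Int)) (n : Int) (m : Int) : Int :=
  let dp := info.foldl (dpStep n m) (PySem.Dict.ofList [(0, 0)])
  if dp.size ≠ 0 then (PySem.List.min? dp.keys (fun v => v)).getD (-1) else -1

-- ===== PORT B =====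
-- ra = [(a+x, b) for a,b in front if a+x < n]
def shiftA (n x : Int) (front : List (Int × Int)) : List (Int × Int) :=
  front.filterMap (fun p => if p.1 + x < n then some (p.1 + x, p.2) else none)

-- rb = [(a, b+y) for a,b in front if b+y < m]
def shiftB (m y : Int) (front : List (Int × Int)) : List (Int × Int) :=
  front.filterMap (fun p => if p.2 + y < m then some (p.1, p.2 + y) else none)

-- two-pointer merge loop (Python tuple <= is lexicographic); the [] cases are the two extend()s
def merge2 : List (Int × Int) → List (Int × Int) → List (Int × Int)
  | [], rb => rb
  | p :: ra, [] => p :: ra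
  | p :: ra, q :: rb =>
    if p.1 < q.1 ∨ (p.1 = q.1 ∧ p.2 ≤ q.2) then p :: merge2 ra (q :: rb)
    else q :: merge2 (p :: ra) rb
termination_by ra rb => ra.length + rb.length

-- dominance sweep: keep (a,b) iff last_b is None or b < last_b
def sweep : Option Int → List (Int × Int) → List (Int × Int)
  | _, [] => []
  | none, p :: t => p :: sweep (some p.2) t
  | some lb, p :: t => if p.2 < lb then p :: sweep (some p.2) t else sweep (some lb) t

def frontStep (n m : Int) (front : List (Int × Int)) (xy : Int × Int) : List (Int × Int) :=
  sweep none (merge2 (shiftA n xy.1 front) (shiftB m xy.2 front))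

def solution_alt (info : List (Int × Int)) (n : Int) (m : Int) : Int :=
  let front := info.foldl (frontStep n m) [(0, 0)]
  match front with
  | [] => -1
  | p :: _ => p.1

-- ===== PRECONDITION & SPEC =====
def Spec_solution (info : List (Int × Int)) (n : Int) (m : Int) (out : Int) : Prop := out = solution_alt info n m
instance (info : List (Int × Int)) (n : Int) (m : Int) (out : Int) : Decidable (Spec_solution info n m out) := by unfold Spec_solution; infer_instance

-- ===== CLAIM (what is proved, stated in full; the proofs are below) =====
def Claim_equal_solution : Prop := ∀ (info : List (Int × Int)) (n : Int) (m : Int), Dom_solution info n m → Spec_solution info n m (solution info n m)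

-- ===== LEMMAS AND PROOFS =====

-- reference semantics: the list of reachable (A-penalty, B-penalty) states, no pruning
def stepR (n m x y : Int) (R : List (Int × Int)) : List (Int × Int) :=
  R.flatMap (fun p => (if p.1 + x < n then [(p.1 + x, p.2)] else []) ++ (if p.2 + y < m then [(p.1, p.2 + y)] else []))

-- (key, candidate-value) contributions one dict entry makes in A's inner loop
def contribA (n m x y : Int) (kv : Int × Int) : List (Int × Int) :=
  (if kv.1 + x < n then [(kv.1 + x, kv.2)] else []) ++ (if kv.2 + y < m then [(kv.1, kv.2 + y)] else [])

def sel (j : Int) (kc : Int × Int) : Option Int := if kc.1 = j then some kc.2 else none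

-- option-valued running minimum
def omin (o : Option Int) (c : Int) : Option Int := some (min (o.getD c) c)

def pm (l : List Int) : Option Int := PySem.List.min? l (fun v => v)

-- b-values of states with A-penalty j
def vals (R : List (Int × Int)) (j : Int) : List Int :=
  R.filterMap (fun p => if p.1 = j then some p.2 else none)

def InvA (R : List (Int × Int)) (dp : PySem.Dict Int Int) : Prop :=
  dp.keys.Nodup ∧ ∀ j, dp.get? j = pm (vals R j)

-- B-side invariant: the frontier is a subset of R, dominates R, and is sorted by A-penalty
def Mono (l : List (Int × Int)) : Prop := l.Pairwise (fun p q => p.1 ≤ q.1)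

def InvF (R F : List (Int × Int)) : Prop :=
  (∀ q ∈ F, q ∈ R) ∧ (∀ p ∈ R, ∃ q ∈ F, q.1 ≤ p.1 ∧ q.2 ≤ p.2) ∧ Mono F

lemma min?_go_some (t : List Int) (v : Int) :
    List.foldl (fun (acc : Option Int) (x : Int) =>
      match acc with
      | none => some x
      | some m => if x < m then some x else some m) (some v) t
      = some (t.foldl min v) := by
  induction t generalizing v with
  | nil => rfl
  | cons c t ih =>
    rw [List.foldl_cons, List.foldl_cons]
    have : (match (some v : Option Int) with
      | none => some c
      | some m => if c < m then some c else some m) = some (min v c) := by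
      simp only [min_def]
      split <;> split <;> first | rfl | omega
    rw [this, ih]

lemma pm_cons (c : Int) (l : List Int) : pm (c :: l) = some (l.foldl min c) := by
  simp only [pm, PySem.List.min?, List.foldl_cons]
  convert min?_go_some l c using 2
  funext acc x
  cases acc <;> simp

lemma foldl_omin_some (l : List Int) (v : Int) : l.foldl omin (some v) = some (l.foldl min v) := by
  induction l generalizing v with
  | nil => rfl
  | cons c t ih => simp [List.foldl_cons, omin, ih]

lemma pm_nil : pm [] = none := rfl

lemma pm_eq_foldl (l : List Int) : pm l = l.foldl omin none := by
  cases l with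
  | nil => rfl
  | cons c t =>
    rw [pm_cons, List.foldl_cons]
    have : omin none c = some c := by simp [omin]
    rw [this, foldl_omin_some]

lemma foldl_min_mem (l : List Int) (v : Int) : l.foldl min v = v ∨ l.foldl min v ∈ l := by
  induction l generalizing v with
  | nil => left; rfl
  | cons c t ih =>
    rw [List.foldl_cons]
    rcases ih (min v c) with h | h
    · rw [h]
      rcases min_choice v c with h' | h' <;> simp [h']
    · right
      simp [h]

lemma foldl_min_le (l : List Int) (v : Int) : l.foldl min v ≤ v ∧ ∀ b ∈ l, l.foldl min v ≤ b := by
  induction l generalizing v with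
  | nil => simp
  | cons c t ih =>
    rw [List.foldl_cons]
    obtain ⟨h1, h2⟩ := ih (min v c)
    refine ⟨le_trans h1 (min_le_left _ _), ?_⟩
    intro b hb
    rcases List.mem_cons.1 hb with rfl | hb
    · exact le_trans h1 (min_le_right _ _)
    · exact h2 _ hb

lemma pm_mem {l : List Int} {a : Int} (h : pm l = some a) : a ∈ l := by
  cases l with
  | nil => simp [pm, PySem.List.min?] at h
  | cons c t =>
    rw [pm_cons] at h
    obtain rfl : t.foldl min c = a := by exact Option.some.inj h
    rcases foldl_min_mem t c with h' | h' <;> simp [h']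

lemma pm_le {l : List Int} {a : Int} (h : pm l = some a) {b : Int} (hb : b ∈ l) : a ≤ b := by
  cases l with
  | nil => simp at hb
  | cons c t =>
    rw [pm_cons] at h
    obtain rfl : t.foldl min c = a := Option.some.inj h
    rcases List.mem_cons.1 hb with rfl | hb
    · exact (foldl_min_le t b).1
    · exact (foldl_min_le t c).2 _ hb

lemma pm_none {l : List Int} (h : pm l = none) : l = [] := by
  cases l with
  | nil => rfl
  | cons c t => rw [pm_cons] at h; simp at h

lemma pm_eq_of_dom (l1 l2 : List Int) (h1 : ∀ w ∈ l1, ∃ u ∈ l2, u ≤ w)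
    (h2 : ∀ u ∈ l2, ∃ w ∈ l1, w ≤ u) : pm l1 = pm l2 := by
  cases e1 : pm l1 with
  | none =>
    cases e2 : pm l2 with
    | none => rfl
    | some a2 =>
      obtain ⟨w, hw, _⟩ := h2 _ (pm_mem e2)
      simp [pm_none e1] at hw
  | some a1 =>
    cases e2 : pm l2 with
    | none =>
      obtain ⟨u, hu, _⟩ := h1 _ (pm_mem e1)
      simp [pm_none e2] at hu
    | some a2 =>
      obtain ⟨u, hu, hua⟩ := h1 _ (pm_mem e1)
      obtain ⟨w, hw, hwa⟩ := h2 _ (pm_mem e2)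
      have := pm_le e2 hu
      have := pm_le e1 hw
      congr 1
      omega

lemma get?_meld (d : PySem.Dict Int Int) (K v j : Int) :
    (d.insert K (min (d.getD K v) v)).get? j = if j = K then omin (d.get? j) v else d.get? j := by
  rw [PySem.Dict.get?_insert]
  split
  · subst j; rw [PySem.Dict.getD_eq_get?_getD]; rfl
  · rfl

lemma foldl_sel_single (acc : Option Int) (j K v : Int) :
    (List.filterMap (sel j) [(K, v)]).foldl omin acc = if j = K then omin acc v else acc := by
  by_cases h : j = K
  · subst h; simp [sel]
  · have h' : ¬(K = j) := fun e => h e.symm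
    simp [sel, h, h']

lemma get?_robStep (n m x y : Int) (rob : PySem.Dict Int Int) (kv : Int × Int) (j : Int) :
    (robStep n m x y rob kv).get? j
      = ((contribA n m x y kv).filterMap (sel j)).foldl omin (rob.get? j) := by
  unfold robStep contribA
  split <;> split <;>
    rw [List.filterMap_append, List.foldl_append] <;>
    simp only [List.filterMap_nil, List.foldl_nil]
  all_goals first
    | rw [get?_meld, get?_meld, foldl_sel_single, foldl_sel_single]
    | rw [get?_meld, foldl_sel_single]

lemma get?_foldl_contrib (f : PySem.Dict Int Int → Int × Int → PySem.Dict Int Int)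
    (c : Int × Int → List (Int × Int))
    (hf : ∀ d kv j, (f d kv).get? j = ((c kv).filterMap (sel j)).foldl omin (d.get? j))
    (L : List (Int × Int)) (d : PySem.Dict Int Int) (j : Int) :
    (L.foldl f d).get? j = ((L.flatMap c).filterMap (sel j)).foldl omin (d.get? j) := by
  induction L generalizing d with
  | nil => rfl
  | cons kv L ih =>
    rw [List.foldl_cons, ih, List.flatMap_cons, List.filterMap_append, List.foldl_append, hf]

lemma nodup_keys_foldl_step (f : PySem.Dict Int Int → Int × Int → PySem.Dict Int Int)
    (hf : ∀ d kv, d.keys.Nodup → (f d kv).keys.Nodup)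
    (L : List (Int × Int)) (d : PySem.Dict Int Int) (hd : d.keys.Nodup) :
    (L.foldl f d).keys.Nodup := by
  induction L generalizing d with
  | nil => exact hd
  | cons kv L ih => exact ih _ (hf _ _ hd)

lemma nodup_robStep (n m x y : Int) (d : PySem.Dict Int Int) (kv : Int × Int)
    (h : d.keys.Nodup) : (robStep n m x y d kv).keys.Nodup := by
  unfold robStep
  split <;> split <;> solve
    | exact PySem.Dict.nodup_keys_insert _ _ _ (PySem.Dict.nodup_keys_insert _ _ _ h)
    | exact PySem.Dict.nodup_keys_insert _ _ _ h
    | exact h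

lemma sel_eq_some {j w : Int} {kc : Int × Int} : sel j kc = some w ↔ kc.1 = j ∧ kc.2 = w := by
  unfold sel; split <;> simp_all

lemma mem_ite_singleton {α : Type} (c : Prop) [Decidable c] (a b : α) :
    (a ∈ (if c then [b] else [])) ↔ c ∧ a = b := by
  split <;> simp_all

lemma mem_contribA {n m x y : Int} {kv kc : Int × Int} :
    kc ∈ contribA n m x y kv ↔
      (kv.1 + x < n ∧ kc = (kv.1 + x, kv.2)) ∨ (kv.2 + y < m ∧ kc = (kv.1, kv.2 + y)) := by
  unfold contribA
  simp [List.mem_append]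

lemma mem_vals {R : List (Int × Int)} {j w : Int} :
    w ∈ vals R j ↔ ∃ p ∈ R, p.1 = j ∧ p.2 = w := by
  unfold vals
  simp only [List.mem_filterMap]
  constructor
  · rintro ⟨p, hp, hs⟩
    refine ⟨p, hp, ?_⟩
    revert hs; split <;> simp_all
  · rintro ⟨p, hp, h1, h2⟩
    exact ⟨p, hp, by simp [h1, h2]⟩

lemma mem_stepR {n m x y : Int} {R : List (Int × Int)} {q : Int × Int} :
    q ∈ stepR n m x y R ↔
      ∃ p ∈ R, (p.1 + x < n ∧ q = (p.1 + x, p.2)) ∨ (p.2 + y < m ∧ q = (p.1, p.2 + y)) := by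
  unfold stepR
  simp only [List.mem_flatMap, List.mem_append, mem_ite_singleton]

lemma mem_selL {L : List (Int × Int)} {c : Int × Int → List (Int × Int)} {j w : Int} :
    w ∈ (L.flatMap c).filterMap (sel j) ↔ ∃ kv ∈ L, ∃ kc ∈ c kv, kc.1 = j ∧ kc.2 = w := by
  simp only [List.mem_filterMap, List.mem_flatMap]
  constructor
  · rintro ⟨kc, ⟨kv, hkv, hkc⟩, hs⟩
    exact ⟨kv, hkv, kc, hkc, sel_eq_some.1 hs⟩
  · rintro ⟨kv, hkv, kc, hkc, h1, h2⟩
    exact ⟨kc, ⟨kv, hkv, hkc⟩, sel_eq_some.2 ⟨h1, h2⟩⟩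

lemma pm_some_of_mem {l : List Int} {b : Int} (hb : b ∈ l) : ∃ v, pm l = some v ∧ v ≤ b := by
  cases e : pm l with
  | none => rw [pm_none e] at hb; simp at hb
  | some v => exact ⟨v, rfl, pm_le e hb⟩

lemma item_state {R : List (Int × Int)} {dp : PySem.Dict Int Int} (h : InvA R dp)
    {kv : Int × Int} (hkv : kv ∈ dp.items) : kv ∈ R := by
  have hg : dp.get? kv.1 = some kv.2 := PySem.Dict.get?_of_mem_items dp hkv h.1
  rw [h.2 kv.1] at hg
  obtain ⟨p, hp, h1, h2⟩ := mem_vals.1 (pm_mem hg)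
  have : p = kv := Prod.ext h1 h2
  rwa [this] at hp

lemma state_item {R : List (Int × Int)} {dp : PySem.Dict Int Int} (h : InvA R dp)
    {p : Int × Int} (hp : p ∈ R) : ∃ v, (p.1, v) ∈ dp.items ∧ v ≤ p.2 := by
  have hm : p.2 ∈ vals R p.1 := mem_vals.2 ⟨p, hp, rfl, rfl⟩
  obtain ⟨v, hv, hle⟩ := pm_some_of_mem hm
  have hg : dp.get? p.1 = some v := by rw [h.2 p.1, hv]
  exact ⟨v, PySem.Dict.mem_items_of_get?_eq_some _ hg, hle⟩

lemma stepA_inv (n m x y : Int) (R : List (Int × Int)) (dp : PySem.Dict Int Int)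
    (h : InvA R dp) : InvA (stepR n m x y R) (dpStep n m dp (x, y)) := by
  constructor
  · exact nodup_keys_foldl_step _ (nodup_robStep n m x y) _ _ PySem.Dict.nodup_keys_empty
  · intro j
    show (dp.items.foldl (robStep n m x y) PySem.Dict.empty).get? j = _
    rw [get?_foldl_contrib (robStep n m x y) (contribA n m x y) (get?_robStep n m x y),
      PySem.Dict.get?_empty, ← pm_eq_foldl]
    apply pm_eq_of_dom
    · intro w hw
      obtain ⟨kv, hkv, kc, hkc, hj, hw'⟩ := mem_selL.1 hw
      have hR : kv ∈ R := item_state h hkv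
      rcases mem_contribA.1 hkc with ⟨hg, rfl⟩ | ⟨hg, rfl⟩
      · exact ⟨w, mem_vals.2 ⟨(kv.1 + x, kv.2), mem_stepR.2 ⟨kv, hR, Or.inl ⟨hg, rfl⟩⟩, hj, hw'⟩, le_refl w⟩
      · exact ⟨w, mem_vals.2 ⟨(kv.1, kv.2 + y), mem_stepR.2 ⟨kv, hR, Or.inr ⟨hg, rfl⟩⟩, hj, hw'⟩, le_refl w⟩
    · intro u hu
      obtain ⟨q, hq, hj, hu'⟩ := mem_vals.1 hu
      obtain ⟨p, hp, hbr⟩ := mem_stepR.1 hq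
      obtain ⟨v, hvi, hvle⟩ := state_item h hp
      rcases hbr with ⟨hg, rfl⟩ | ⟨hg, rfl⟩
      · refine ⟨v, mem_selL.2 ⟨(p.1, v), hvi, (p.1 + x, v), mem_contribA.2 (Or.inl ⟨hg, rfl⟩), hj, rfl⟩, ?_⟩
        omega
      · refine ⟨v + y, mem_selL.2 ⟨(p.1, v), hvi, (p.1, v + y), mem_contribA.2 (Or.inr ⟨by omega, rfl⟩), hj, rfl⟩, ?_⟩
        omega

lemma mainA (n m : Int) (info : List (Int × Int)) :
    ∀ (R : List (Int × Int)) (dp : PySem.Dict Int Int), InvA R dp →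
      InvA (info.foldl (fun R xy => stepR n m xy.1 xy.2 R) R) (info.foldl (dpStep n m) dp) := by
  induction info with
  | nil => exact fun R dp h => h
  | cons xy t ih =>
    intro R dp h
    exact ih _ _ (stepA_inv n m xy.1 xy.2 R dp h)

lemma initA : InvA [((0 : Int), (0 : Int))] (PySem.Dict.ofList [(0, 0)]) := by
  constructor
  · decide
  · intro j
    by_cases hj : j = 0
    · subst hj; decide
    · have h1 : (PySem.Dict.ofList [((0 : Int), (0 : Int))]).get? j = none := by
        rw [show PySem.Dict.ofList [((0 : Int), (0 : Int))] = PySem.Dict.mk [(0, 0)] from by decide,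
          PySem.Dict.get?_mk_cons]
        simp only [beq_iff_eq, if_neg (Ne.symm hj)]
        exact PySem.Dict.get?_empty j
      have h2 : vals [((0 : Int), (0 : Int))] j = [] := by
        unfold vals
        simp [Ne.symm hj]
      rw [h1, h2, pm_nil]

lemma items_nil_iffA {R : List (Int × Int)} {dp : PySem.Dict Int Int} (h : InvA R dp) :
    dp.items = [] ↔ R = [] := by
  constructor
  · intro he
    cases hR : R with
    | nil => rfl
    | cons p t =>
      obtain ⟨v, hvi, _⟩ := state_item h (by rw [hR]; exact List.mem_cons_self)
      rw [he] at hvi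
      simp at hvi
  · intro hR
    cases he : dp.items with
    | nil => rfl
    | cons kv t =>
      have : kv ∈ R := item_state h (by rw [he]; exact List.mem_cons_self)
      rw [hR] at this
      simp at this

lemma keys_min_eq {R : List (Int × Int)} {dp : PySem.Dict Int Int} (h : InvA R dp) :
    pm dp.keys = pm (R.map Prod.fst) := by
  apply pm_eq_of_dom
  · intro w hw
    simp only [PySem.Dict.keys, List.mem_map] at hw
    obtain ⟨kv, hkv, rfl⟩ := hw
    exact ⟨kv.1, List.mem_map.2 ⟨kv, item_state h hkv, rfl⟩, le_refl _⟩
  · intro u hu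
    obtain ⟨p, hp, rfl⟩ := List.mem_map.1 hu
    obtain ⟨v, hvi, _⟩ := state_item h hp
    refine ⟨p.1, ?_, le_refl _⟩
    simp only [PySem.Dict.keys, List.mem_map]
    exact ⟨(p.1, v), hvi, rfl⟩

-- ===== B-side lemmas =====

lemma mem_shiftA {n x : Int} {front : List (Int × Int)} {q : Int × Int} :
    q ∈ shiftA n x front ↔ ∃ p ∈ front, p.1 + x < n ∧ q = (p.1 + x, p.2) := by
  unfold shiftA
  simp only [List.mem_filterMap]
  constructor
  · rintro ⟨p, hp, hs⟩
    refine ⟨p, hp, ?_⟩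
    revert hs; split <;> simp_all
  · rintro ⟨p, hp, h1, rfl⟩
    exact ⟨p, hp, by simp [h1]⟩

lemma mem_shiftB {m y : Int} {front : List (Int × Int)} {q : Int × Int} :
    q ∈ shiftB m y front ↔ ∃ p ∈ front, p.2 + y < m ∧ q = (p.1, p.2 + y) := by
  unfold shiftB
  simp only [List.mem_filterMap]
  constructor
  · rintro ⟨p, hp, hs⟩
    refine ⟨p, hp, ?_⟩
    revert hs; split <;> simp_all
  · rintro ⟨p, hp, h1, rfl⟩
    exact ⟨p, hp, by simp [h1]⟩

lemma mem_merge2 : ∀ (ra rb : List (Int × Int)) (q : Int × Int),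
    q ∈ merge2 ra rb ↔ q ∈ ra ∨ q ∈ rb := by
  intro ra rb q
  induction ra, rb using merge2.induct with
  | case1 rb => simp [merge2]
  | case2 p ra => simp [merge2]
  | case3 p ra q' rb hc ih =>
    rw [merge2, if_pos hc]
    simp only [List.mem_cons, ih]
    tauto
  | case4 p ra q' rb hc ih =>
    rw [merge2, if_neg hc]
    simp only [List.mem_cons, ih]
    tauto

lemma mono_merge2 : ∀ (ra rb : List (Int × Int)), Mono ra → Mono rb → Mono (merge2 ra rb) := by
  intro ra rb
  induction ra, rb using merge2.induct with
  | case1 rb => intro _ h; simpa [merge2] using h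
  | case2 p ra => intro h _; simpa [merge2] using h
  | case3 p ra q' rb hc ih =>
    intro ha hb
    rw [merge2, if_pos hc]
    obtain ⟨hpa, ha'⟩ := List.pairwise_cons.1 ha
    obtain ⟨hqb, hb'⟩ := List.pairwise_cons.1 hb
    refine List.pairwise_cons.2 ⟨?_, ih ha' hb⟩
    intro r hr
    rcases (mem_merge2 _ _ _).1 hr with h | h
    · exact hpa _ h
    · rcases List.mem_cons.1 h with rfl | h
      · omega
      · have := hqb _ h
        omega
  | case4 p ra q' rb hc ih =>
    intro ha hb
    rw [merge2, if_neg hc]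
    obtain ⟨hpa, ha'⟩ := List.pairwise_cons.1 ha
    obtain ⟨hqb, hb'⟩ := List.pairwise_cons.1 hb
    refine List.pairwise_cons.2 ⟨?_, ih ha hb'⟩
    intro r hr
    rw [not_or, not_and_or] at hc
    rcases (mem_merge2 _ _ _).1 hr with h | h
    · rcases List.mem_cons.1 h with rfl | h
      · omega
      · have := hpa _ h
        omega
    · exact hqb _ h

lemma mem_sweep : ∀ (lb : Option Int) (l : List (Int × Int)) (q : Int × Int),
    q ∈ sweep lb l → q ∈ l := by
  intro lb l
  induction l generalizing lb with
  | nil => intro q h; cases lb <;> simp [sweep] at h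
  | cons p t ih =>
    intro q h
    cases lb with
    | none =>
      rw [sweep] at h
      rcases List.mem_cons.1 h with rfl | h
      · exact List.mem_cons_self
      · exact List.mem_cons_of_mem _ (ih _ _ h)
    | some b =>
      rw [sweep] at h
      split at h
      · rcases List.mem_cons.1 h with rfl | h
        · exact List.mem_cons_self
        · exact List.mem_cons_of_mem _ (ih _ _ h)
      · exact List.mem_cons_of_mem _ (ih _ _ h)

lemma mono_sweep : ∀ (lb : Option Int) (l : List (Int × Int)), Mono l → Mono (sweep lb l) := by
  intro lb l
  induction l generalizing lb with
  | nil => intro _; cases lb <;> simp [sweep, Mono]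
  | cons p t ih =>
    intro h
    obtain ⟨hp, ht⟩ := List.pairwise_cons.1 h
    cases lb with
    | none =>
      rw [sweep]
      exact List.pairwise_cons.2 ⟨fun r hr => hp _ (mem_sweep _ _ _ hr), ih _ ht⟩
    | some b =>
      rw [sweep]
      split
      · exact List.pairwise_cons.2 ⟨fun r hr => hp _ (mem_sweep _ _ _ hr), ih _ ht⟩
      · exact ih _ ht

lemma cover_sweep : ∀ (l : List (Int × Int)) (lb : Option Int), Mono l →
    ∀ p ∈ l, (∃ q ∈ sweep lb l, q.1 ≤ p.1 ∧ q.2 ≤ p.2) ∨ (∃ b, lb = some b ∧ b ≤ p.2) := by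
  intro l
  induction l with
  | nil => intro lb _ p hp; simp at hp
  | cons r t ih =>
    intro lb hm p hp
    obtain ⟨hr, ht⟩ := List.pairwise_cons.1 hm
    cases lb with
    | none =>
      rw [sweep]
      rcases List.mem_cons.1 hp with rfl | hp
      · exact Or.inl ⟨p, List.mem_cons_self, le_refl _, le_refl _⟩
      · rcases ih (some r.2) ht p hp with ⟨q, hq, h1, h2⟩ | ⟨b, hb, h2⟩
        · exact Or.inl ⟨q, List.mem_cons_of_mem _ hq, h1, h2⟩
        · obtain rfl : r.2 = b := Option.some.inj hb
          exact Or.inl ⟨r, List.mem_cons_self, hr _ hp, h2⟩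
    | some b0 =>
      rw [sweep]
      split
      · rcases List.mem_cons.1 hp with rfl | hp
        · exact Or.inl ⟨p, List.mem_cons_self, le_refl _, le_refl _⟩
        · rcases ih (some r.2) ht p hp with ⟨q, hq, h1, h2⟩ | ⟨b, hb, h2⟩
          · exact Or.inl ⟨q, List.mem_cons_of_mem _ hq, h1, h2⟩
          · obtain rfl : r.2 = b := Option.some.inj hb
            exact Or.inl ⟨r, List.mem_cons_self, hr _ hp, h2⟩
      · rename_i hge
        rcases List.mem_cons.1 hp with rfl | hp
        · exact Or.inr ⟨b0, rfl, by omega⟩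
        · rcases ih (some b0) ht p hp with ⟨q, hq, h1, h2⟩ | ⟨b, hb, h2⟩
          · exact Or.inl ⟨q, hq, h1, h2⟩
          · exact Or.inr ⟨b, hb, h2⟩

lemma mono_shiftA (n x : Int) (front : List (Int × Int)) (h : Mono front) :
    Mono (shiftA n x front) := by
  unfold shiftA Mono
  rw [List.pairwise_filterMap]
  refine h.imp_of_mem ?_
  intro p q _ _ hpq a ha b hb
  by_cases h1 : p.1 + x < n
  · by_cases h2 : q.1 + x < n
    · simp only [h1, h2, if_pos, Option.some.injEq] at ha hb
      rw [← ha, ← hb]; simpa using by omega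
    · simp [h2] at hb
  · simp [h1] at ha

lemma mono_shiftB (m y : Int) (front : List (Int × Int)) (h : Mono front) :
    Mono (shiftB m y front) := by
  unfold shiftB Mono
  rw [List.pairwise_filterMap]
  refine h.imp_of_mem ?_
  intro p q _ _ hpq a ha b hb
  by_cases h1 : p.2 + y < m
  · by_cases h2 : q.2 + y < m
    · simp only [h1, h2, if_pos, Option.some.injEq] at ha hb
      rw [← ha, ← hb]; simpa using hpq
    · simp [h2] at hb
  · simp [h1] at ha

lemma stepF_inv (n m x y : Int) (R F : List (Int × Int)) (h : InvF R F) :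
    InvF (stepR n m x y R) (frontStep n m F (x, y)) := by
  obtain ⟨hsub, hcov, hmono⟩ := h
  have hmerged_mono : Mono (merge2 (shiftA n x F) (shiftB m y F)) :=
    mono_merge2 _ _ (mono_shiftA n x F hmono) (mono_shiftB m y F hmono)
  refine ⟨?_, ?_, mono_sweep _ _ hmerged_mono⟩
  · intro q hq
    have hq' := mem_sweep _ _ _ hq
    rcases (mem_merge2 _ _ _).1 hq' with h | h
    · obtain ⟨p, hp, h1, rfl⟩ := mem_shiftA.1 h
      exact mem_stepR.2 ⟨p, hsub _ hp, Or.inl ⟨h1, rfl⟩⟩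
    · obtain ⟨p, hp, h1, rfl⟩ := mem_shiftB.1 h
      exact mem_stepR.2 ⟨p, hsub _ hp, Or.inr ⟨h1, rfl⟩⟩
  · intro p' hp'
    obtain ⟨p, hp, hbr⟩ := mem_stepR.1 hp'
    obtain ⟨q, hq, hq1, hq2⟩ := hcov _ hp
    rcases hbr with ⟨hg, rfl⟩ | ⟨hg, rfl⟩
    · have hmem : (q.1 + x, q.2) ∈ merge2 (shiftA n x F) (shiftB m y F) :=
        (mem_merge2 _ _ _).2 (Or.inl (mem_shiftA.2 ⟨q, hq, by omega, rfl⟩))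
      rcases cover_sweep _ none hmerged_mono _ hmem with ⟨r, hr, h1, h2⟩ | ⟨b, hb, _⟩
      · exact ⟨r, hr, by simp at h1 h2 ⊢; omega⟩
      · cases hb
    · have hmem : (q.1, q.2 + y) ∈ merge2 (shiftA n x F) (shiftB m y F) :=
        (mem_merge2 _ _ _).2 (Or.inr (mem_shiftB.2 ⟨q, hq, by omega, rfl⟩))
      rcases cover_sweep _ none hmerged_mono _ hmem with ⟨r, hr, h1, h2⟩ | ⟨b, hb, _⟩
      · exact ⟨r, hr, by simp at h1 h2 ⊢; omega⟩
      · cases hb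
  
lemma mainF (n m : Int) (info : List (Int × Int)) :
    ∀ (R F : List (Int × Int)), InvF R F →
      InvF (info.foldl (fun R xy => stepR n m xy.1 xy.2 R) R) (info.foldl (frontStep n m) F) := by
  induction info with
  | nil => exact fun R F h => h
  | cons xy t ih =>
    intro R F h
    exact ih _ _ (stepF_inv n m xy.1 xy.2 R F h)

lemma initF : InvF [((0 : Int), (0 : Int))] [((0 : Int), (0 : Int))] := by
  refine ⟨fun q hq => hq, ?_, ?_⟩
  · intro p hp
    exact ⟨p, hp, le_refl _, le_refl _⟩
  · exact List.pairwise_singleton _ _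

lemma head_min {p : Int × Int} {t : List (Int × Int)} (h : Mono (p :: t)) :
    pm ((p :: t).map Prod.fst) = some p.1 := by
  obtain ⟨hp, _⟩ := List.pairwise_cons.1 h
  cases e : pm ((p :: t).map Prod.fst) with
  | none =>
    have := pm_none e
    simp at this
  | some v =>
    have hv := pm_mem e
    obtain ⟨q, hq, hq1⟩ := List.mem_map.1 hv
    have h1 : v ≤ p.1 := pm_le e (List.mem_map.2 ⟨p, List.mem_cons_self, rfl⟩)
    rcases List.mem_cons.1 hq with rfl | hq
    · rw [hq1]
    · have := hp _ hq
      congr 1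
      omega

-- ===== VERDICT (by name: the statement is the Claim_ definition above) =====
theorem solution_spec : Claim_equal_solution := by
  unfold Claim_equal_solution
  intro info n m _
  unfold Spec_solution solution solution_alt
  have hA := mainA n m info [((0 : Int), (0 : Int))] (PySem.Dict.ofList [(0, 0)]) initA
  have hF := mainF n m info [((0 : Int), (0 : Int))] [((0 : Int), (0 : Int))] initF
  set R := info.foldl (fun R xy => stepR n m xy.1 xy.2 R) [((0 : Int), (0 : Int))] with hR
  set dpA := info.foldl (dpStep n m) (PySem.Dict.ofList [(0, 0)]) with hdpA
  set F := info.foldl (frontStep n m) [((0 : Int), (0 : Int))] with hFdef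
  obtain ⟨hsub, hcov, hmono⟩ := hF
  have hsize : dpA.size = dpA.items.length := rfl
  by_cases hRe : R = []
  · have h1 : dpA.items = [] := (items_nil_iffA hA).2 hRe
    have h2 : F = [] := by
      cases hFe : F with
      | nil => rfl
      | cons q t =>
        have : q ∈ R := hsub q (by rw [hFe]; exact List.mem_cons_self)
        rw [hRe] at this
        simp at this
    simp [hsize, h1, h2]
  · have h1 : dpA.items ≠ [] := fun e => hRe ((items_nil_iffA hA).1 e)
    cases hFe : F with
    | nil =>
      exfalso
      cases hRc : R with
      | nil => exact hRe hRc
      | cons p t =>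
        obtain ⟨q, hq, _⟩ := hcov p (by rw [hRc]; exact List.mem_cons_self)
        rw [hFe] at hq
        simp at hq
    | cons p t =>
      rw [if_pos (by simpa [hsize, List.length_eq_zero_iff] using h1)]
      show (pm dpA.keys).getD (-1) = p.1
      rw [keys_min_eq hA]
      have hpm : pm (R.map Prod.fst) = some p.1 := by
        rw [← head_min (hFe ▸ hmono)]
        apply pm_eq_of_dom
        · intro w hw
          obtain ⟨r, hr, rfl⟩ := List.mem_map.1 hw
          obtain ⟨q, hq, h1', _⟩ := hcov _ hr
          exact ⟨q.1, List.mem_map.2 ⟨q, hFe ▸ hq, rfl⟩, h1'⟩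
        · intro u hu
          obtain ⟨q, hq, rfl⟩ := List.mem_map.1 hu
          exact ⟨q.1, List.mem_map.2 ⟨q, hsub _ (hFe ▸ hq), rfl⟩, le_refl _⟩
      rw [hpm]
      rfl
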